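-- pv_equiv track=rewrite | github.com/kmkj90cont151/kq-tid | tools/keikyu_local_core.py | pick_platform
-- ===== SOURCE A (Python) =====
-- from typing import Any
--
-- def string_or_empty(value: Any) -> str:
--     return "" if value is None else str(value)
--
-- def pick_platform(position_info: dict[str, Any], detail_rows: list[dict[str, Any]]) -> str:
--     station_label = string_or_empty(position_info.get("stationLabel"))
--     if station_label:
--         for row in detail_rows:
--             if row.get("platform") and row.get("stationLabel") == station_label:
--                 return string_or_empty(row["platform"])
--     for row in detail_rows:
--         if row.get("platform"):
--             return string_or_empty(row["platform"])
--     return ""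
-- ===== SOURCE B (Python) =====
-- def string_or_empty(value):
--     return "" if value is None else str(value)
--
-- def pick_platform(position_info, detail_rows):
--     station_label = string_or_empty(position_info.get("stationLabel"))
--     first_available = None
--     for row in detail_rows:
--         platform = row.get("platform")
--         if platform:
--             p = string_or_empty(platform)
--             if station_label and row.get("stationLabel") == station_label:
--                 return p
--             if first_available is None:
--                 first_available = p
--     return first_available if first_available is not None else ""
-- ===== Notes on version B (the rewrite author's own statement) =====
-- stated objective: simpler
-- what changed: Replaces A's two sequential scans over detail_rows (one for a label match, one for any platform) by a single pass that remembers the first platform-bearing row and returns early on a label match.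
import Mathlib
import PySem

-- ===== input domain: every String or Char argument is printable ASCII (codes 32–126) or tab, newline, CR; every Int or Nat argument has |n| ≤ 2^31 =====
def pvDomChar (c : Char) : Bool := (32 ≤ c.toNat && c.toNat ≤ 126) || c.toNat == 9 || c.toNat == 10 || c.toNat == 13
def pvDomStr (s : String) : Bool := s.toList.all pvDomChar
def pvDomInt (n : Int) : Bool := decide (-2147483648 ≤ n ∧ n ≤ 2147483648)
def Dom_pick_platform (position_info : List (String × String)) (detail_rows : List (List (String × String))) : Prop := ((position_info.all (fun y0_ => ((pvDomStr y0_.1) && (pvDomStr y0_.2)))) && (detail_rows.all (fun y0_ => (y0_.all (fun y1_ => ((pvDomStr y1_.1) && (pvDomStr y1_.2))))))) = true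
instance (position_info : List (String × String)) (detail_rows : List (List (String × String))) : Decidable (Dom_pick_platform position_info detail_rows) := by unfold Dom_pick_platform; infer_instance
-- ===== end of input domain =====

-- B replaces A's two sequential scans by one pass with a first-available accumulator (objective: simpler).
-- ===== PORT A =====
-- first loop of A: find a row whose platform is truthy and whose stationLabel == station_label
-- (Python's `row.get("stationLabel") == station_label`: None == str is False, so `get? = some sl` is exact)
def pvLoopA1 (sl : String) : List (List (String × String)) → Option String
  | [] => none
  | r :: rs =>
    if PySem.Dict.getD (PySem.Dict.mk r) "platform" "" ≠ "" ∧ PySem.Dict.get? (PySem.Dict.mk r) "stationLabel" = some sl then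
      some (PySem.Dict.getD (PySem.Dict.mk r) "platform" "")
    else pvLoopA1 sl rs

-- second loop of A: first truthy platform
def pvLoopA2 : List (List (String × String)) → String
  | [] => ""
  | r :: rs =>
    if PySem.Dict.getD (PySem.Dict.mk r) "platform" "" ≠ "" then PySem.Dict.getD (PySem.Dict.mk r) "platform" ""
    else pvLoopA2 rs

def pick_platform (position_info : List (String × String)) (detail_rows : List (List (String × String))) : String :=
  let station_label := PySem.Dict.getD (PySem.Dict.mk position_info) "stationLabel" ""  -- string_or_empty(get(...)) : "" if missing
  if station_label ≠ "" then
    match pvLoopA1 station_label detail_rows with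
    | some p => p
    | none => pvLoopA2 detail_rows
  else pvLoopA2 detail_rows

-- ===== PORT B =====
-- single pass carrying first_available : Option String
def pvLoopB (sl : String) (first : Option String) : List (List (String × String)) → String
  | [] => match first with | some f => f | none => ""
  | r :: rs =>
    let p := PySem.Dict.getD (PySem.Dict.mk r) "platform" ""
    if p ≠ "" then
      if sl ≠ "" ∧ PySem.Dict.get? (PySem.Dict.mk r) "stationLabel" = some sl then p
      else pvLoopB sl (if first = none then some p else first) rs
    else pvLoopB sl first rs

def pick_platform_alt (position_info : List (String × String)) (detail_rows : List (List (String × String))) : String :=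
  let station_label := PySem.Dict.getD (PySem.Dict.mk position_info) "stationLabel" ""
  pvLoopB station_label none detail_rows

-- ===== PRECONDITION & SPEC =====
def Spec_pick_platform (position_info : List (String × String)) (detail_rows : List (List (String × String))) (out : String) : Prop := out = pick_platform_alt position_info detail_rows
instance (position_info : List (String × String)) (detail_rows : List (List (String × String))) (out : String) : Decidable (Spec_pick_platform position_info detail_rows out) := by unfold Spec_pick_platform; infer_instance

-- ===== CLAIM (what is proved, stated in full; the proofs are below) =====
def Claim_equal_pick_platform : Prop := ∀ (position_info : List (String × String)) (detail_rows : List (List (String × String))), Dom_pick_platform position_info detail_rows → Spec_pick_platform position_info detail_rows (pick_platform position_info detail_rows)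

-- ===== LEMMAS AND PROOFS =====
theorem pvLoopB_eq (sl : String) (rows : List (List (String × String))) : ∀ first : Option String,
    pvLoopB sl first rows =
      match (if sl = "" then none else pvLoopA1 sl rows) with
      | some p => p
      | none => (match first with | some f => f | none => pvLoopA2 rows) := by
  induction rows with
  | nil =>
    intro first
    cases first <;> simp [pvLoopB, pvLoopA1, pvLoopA2]
  | cons r rs ih =>
    intro first
    by_cases hp : PySem.Dict.getD (PySem.Dict.mk r) "platform" "" ≠ ""
    · by_cases hm : sl ≠ "" ∧ PySem.Dict.get? (PySem.Dict.mk r) "stationLabel" = some sl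
      · rw [pvLoopB, if_pos hp, if_pos hm, if_neg hm.1, pvLoopA1, if_pos ⟨hp, hm.2⟩]
      · rw [pvLoopB, if_pos hp, if_neg hm, ih]
        by_cases hs : sl = ""
        · simp only [hs, if_pos]
          cases first <;> simp [pvLoopA2, hp]
        · have heq : ¬ PySem.Dict.get? (PySem.Dict.mk r) "stationLabel" = some sl :=
            fun h => hm ⟨hs, h⟩
          have hA1 : pvLoopA1 sl (r :: rs) = pvLoopA1 sl rs := by
            rw [pvLoopA1, if_neg (fun h => heq h.2)]
          rw [if_neg hs, if_neg hs, hA1]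
          cases hcase : pvLoopA1 sl rs with
          | some q => simp
          | none => cases first <;> simp [pvLoopA2, hp]
    · rw [pvLoopB, if_neg hp, ih]
      have hA1 : pvLoopA1 sl (r :: rs) = pvLoopA1 sl rs := by
        rw [pvLoopA1, if_neg (fun h => hp h.1)]
      have hA2 : pvLoopA2 (r :: rs) = pvLoopA2 rs := by
        rw [pvLoopA2, if_neg hp]
      simp only [hA1, hA2]

-- ===== VERDICT (by name: the statement is the Claim_ definition above) =====
theorem pick_platform_spec : Claim_equal_pick_platform := by
  intro pi rows _
  unfold Spec_pick_platform pick_platform pick_platform_alt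
  rw [pvLoopB_eq]
  by_cases hs : PySem.Dict.getD (PySem.Dict.mk pi) "stationLabel" "" = "" <;> simp [hs]
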